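-- pv_equiv track=rewrite | github.com/PaddlePaddle/awesome-DeepLearning | Paddle_Industry_Practice_Sample_Library/nlp_projects/relation_extraction/ernie/data.py | find_entity_with_visited
-- ===== SOURCE A (Python) =====
-- def find_entity_with_visited(input_ids, entity_ids, visited):
--     entity_len = len(entity_ids)
--     match_start, match_end = -1, -1
--     for idx in range(len(input_ids)):
--         if sum(visited[idx:idx+entity_len])!=0:
--             continue
--         if input_ids[idx:idx+entity_len] == entity_ids:
--             match_start = idx
--             match_end = idx+entity_len-1
--             break
--     return match_start, match_end
-- ===== SOURCE B (Python) =====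
-- def find_entity_with_visited(input_ids, entity_ids, visited):
--     L = len(entity_ids)
--     nv = len(visited)
--     # prefix sums of visited: pre[j] == sum(visited[:j])
--     pre = [0]
--     s = 0
--     for v in visited:
--         s += v
--         pre.append(s)
--     # starts whose visited window sums to zero (slice clamping == min with nv)
--     candidates = [i for i in range(len(input_ids))
--                   if pre[min(i + L, nv)] - pre[min(i, nv)] == 0]
--     for i in candidates:
--         if input_ids[i:i + L] == entity_ids:
--             return i, i + L - 1
--     return -1, -1
-- ===== Notes on version B (the rewrite author's own statement) =====
-- stated objective: faster
-- what changed: B precomputes prefix sums of visited so each window's zero-sum check is O(1), collects the candidate starts in one pass, and only compares input slices at those candidates, instead of A's per-index O(m) sum of a fresh slice.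
import Mathlib
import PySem

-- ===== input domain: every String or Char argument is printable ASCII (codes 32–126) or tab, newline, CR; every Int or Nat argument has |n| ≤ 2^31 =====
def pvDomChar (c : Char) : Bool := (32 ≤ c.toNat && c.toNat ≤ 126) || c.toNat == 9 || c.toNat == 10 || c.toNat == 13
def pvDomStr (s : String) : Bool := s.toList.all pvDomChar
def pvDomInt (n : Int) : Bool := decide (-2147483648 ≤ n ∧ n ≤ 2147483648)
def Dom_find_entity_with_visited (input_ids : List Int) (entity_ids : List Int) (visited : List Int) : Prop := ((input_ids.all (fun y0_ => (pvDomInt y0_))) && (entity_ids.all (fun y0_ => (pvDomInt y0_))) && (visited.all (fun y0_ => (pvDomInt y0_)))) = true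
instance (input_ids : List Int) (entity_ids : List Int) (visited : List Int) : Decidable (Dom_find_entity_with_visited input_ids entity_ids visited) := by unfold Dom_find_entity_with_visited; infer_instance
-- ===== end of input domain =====

-- B replaces A's per-index O(m) window sum by prefix sums plus a one-pass candidate list (faster).

-- ===== PORT A =====
-- the for-loop with continue/break, over range(len(input_ids))
def fevLoopA (input_ids entity_ids visited : List Int) (L : Nat) : List Nat → Int × Int
  | [] => (-1, -1)
  | k :: rest =>
    if (PySem.List.slice visited (some (k : Int)) (some ((k : Int) + (L : Int)))).sum ≠ 0 then
      fevLoopA input_ids entity_ids visited L rest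
    else if PySem.List.slice input_ids (some (k : Int)) (some ((k : Int) + (L : Int))) = entity_ids then
      ((k : Int), (k : Int) + (L : Int) - 1)
    else
      fevLoopA input_ids entity_ids visited L rest

def find_entity_with_visited (input_ids : List Int) (entity_ids : List Int) (visited : List Int) : Int × Int :=
  fevLoopA input_ids entity_ids visited entity_ids.length (List.range input_ids.length)

-- ===== PORT B =====
-- prefix sums of visited built by the running-total loop: pre = 0 :: fevPre 0 visited
def fevPre (s : Int) : List Int → List Int
  | [] => []
  | v :: rest => (s + v) :: fevPre (s + v) rest

-- the second loop of B: try each candidate start in order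
def fevLoopB (input_ids entity_ids : List Int) (L : Nat) : List Nat → Int × Int
  | [] => (-1, -1)
  | i :: rest =>
    if PySem.List.slice input_ids (some (i : Int)) (some ((i : Int) + (L : Int))) = entity_ids then
      ((i : Int), (i : Int) + (L : Int) - 1)
    else
      fevLoopB input_ids entity_ids L rest

def find_entity_with_visited_alt (input_ids : List Int) (entity_ids : List Int) (visited : List Int) : Int × Int :=
  let L := entity_ids.length
  let nv := visited.length
  let pre := 0 :: fevPre 0 visited
  -- pre[j] indices are provably in range, so List.getD is exact for Python's pre[·]
  let candidates := (List.range input_ids.length).filter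
    (fun i => pre.getD (min (i + L) nv) 0 - pre.getD (min i nv) 0 == 0)
  fevLoopB input_ids entity_ids L candidates

-- ===== PRECONDITION & SPEC =====
def Spec_find_entity_with_visited (input_ids : List Int) (entity_ids : List Int) (visited : List Int) (out : Int × Int) : Prop := out = find_entity_with_visited_alt input_ids entity_ids visited
instance (input_ids : List Int) (entity_ids : List Int) (visited : List Int) (out : Int × Int) : Decidable (Spec_find_entity_with_visited input_ids entity_ids visited out) := by unfold Spec_find_entity_with_visited; infer_instance

-- ===== CLAIM (what is proved, stated in full; the proofs are below) =====
def Claim_equal_find_entity_with_visited : Prop := ∀ (input_ids : List Int) (entity_ids : List Int) (visited : List Int), Dom_find_entity_with_visited input_ids entity_ids visited → Spec_find_entity_with_visited input_ids entity_ids visited (find_entity_with_visited input_ids entity_ids visited)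

-- ===== LEMMAS AND PROOFS =====

-- pre[j] = sum of the first j elements (generalized over the running total s)
lemma fevPre_getD (l : List Int) (s : Int) (j : Nat) (hj : j ≤ l.length) :
    (s :: fevPre s l).getD j 0 = s + (l.take j).sum := by
  induction l generalizing s j with
  | nil =>
    have : j = 0 := by simpa using hj
    subst this; simp
  | cons v rest ih =>
    cases j with
    | zero => simp
    | succ j' =>
      simp only [fevPre, List.getD_cons_succ, List.take_succ_cons, List.sum_cons]
      rw [ih (s + v) j' (by simpa using hj)]
      ring

-- the window sum A computes equals B's prefix-sum difference
lemma window_sum_eq (visited : List Int) (k L : Nat) :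
    (PySem.List.slice visited (some (k : Int)) (some ((k : Int) + (L : Int)))).sum
      = (0 :: fevPre 0 visited).getD (min (k + L) visited.length) 0
        - (0 :: fevPre 0 visited).getD (min k visited.length) 0 := by
  rw [PySem.List.slice_natCast_add,
      fevPre_getD visited 0 (min (k + L) visited.length) (Nat.min_le_right _ _),
      fevPre_getD visited 0 (min k visited.length) (Nat.min_le_right _ _)]
  have h1 : visited.take (min (k + L) visited.length) = visited.take (k + L) := by
    rw [List.take_eq_take_iff]; omega
  have h2 : visited.take (min k visited.length) = visited.take k := by
    rw [List.take_eq_take_iff]; omega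
  rw [h1, h2, List.take_add, List.sum_append]
  ring

lemma loops_eq (input_ids entity_ids visited : List Int) (ks : List Nat) :
    fevLoopA input_ids entity_ids visited entity_ids.length ks
      = fevLoopB input_ids entity_ids entity_ids.length
          (ks.filter (fun i =>
            (0 :: fevPre 0 visited).getD (min (i + entity_ids.length) visited.length) 0
              - (0 :: fevPre 0 visited).getD (min i visited.length) 0 == 0)) := by
  induction ks with
  | nil => rfl
  | cons k rest ih =>
    rw [fevLoopA, List.filter_cons]
    by_cases hz : (PySem.List.slice visited (some (k : Int))
        (some ((k : Int) + ((entity_ids.length : Nat) : Int)))).sum = 0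
    · have hc : ((0 :: fevPre 0 visited).getD (min (k + entity_ids.length) visited.length) 0
          - (0 :: fevPre 0 visited).getD (min k visited.length) 0 == 0) = true := by
        rw [← window_sum_eq]; simpa using hz
      rw [if_neg (by simpa using hz), hc, if_pos rfl, fevLoopB]
      split
      · rfl
      · exact ih
    · have hc : ((0 :: fevPre 0 visited).getD (min (k + entity_ids.length) visited.length) 0
          - (0 :: fevPre 0 visited).getD (min k visited.length) 0 == 0) = false := by
        rw [← window_sum_eq]; simpa using hz
      rw [if_pos hz, hc]
      simpa using ih

-- ===== VERDICT (by name: the statement is the Claim_ definition above) =====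
theorem find_entity_with_visited_spec : Claim_equal_find_entity_with_visited := by
  intro input_ids entity_ids visited _
  unfold Spec_find_entity_with_visited find_entity_with_visited find_entity_with_visited_alt
  exact loops_eq input_ids entity_ids visited (List.range input_ids.length)
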